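-- pv_equiv track=rewrite | github.com/itsanjalich/leetcode-solutions | Cutting Rectangles - GFG/cutting-rectangles.py | minimumSquares
-- ===== SOURCE A (Python) =====
-- def minimumSquares(L, B):
--     # code here
--     a = max(L,B)
--     b = min(L,B)
--     if a%b==0:
--         return ( [a//b, b])
--     else:
--         while b:
--             a,b=b,a%b
--
--         temp = ((L//a)*(B//a))
--         return([temp , a])
-- ===== SOURCE B (Python) =====
-- def _gcd(x, y):
--     r = x % y
--     return y if r == 0 else _gcd(y, r)
--
-- def minimumSquares(L, B):
--     g = _gcd(max(L, B), min(L, B))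
--     return [(L // g) * (B // g), g]
-- ===== Notes on version B (the rewrite author's own statement) =====
-- stated objective: simpler
-- what changed: Replaces A's divisibility-shortcut branch plus destructive while loop with a single recursive remainder-testing Euclid gcd helper feeding one uniform return formula; Pre_ excludes min(L,B)=0, where both raise ZeroDivisionError.
import Mathlib
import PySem

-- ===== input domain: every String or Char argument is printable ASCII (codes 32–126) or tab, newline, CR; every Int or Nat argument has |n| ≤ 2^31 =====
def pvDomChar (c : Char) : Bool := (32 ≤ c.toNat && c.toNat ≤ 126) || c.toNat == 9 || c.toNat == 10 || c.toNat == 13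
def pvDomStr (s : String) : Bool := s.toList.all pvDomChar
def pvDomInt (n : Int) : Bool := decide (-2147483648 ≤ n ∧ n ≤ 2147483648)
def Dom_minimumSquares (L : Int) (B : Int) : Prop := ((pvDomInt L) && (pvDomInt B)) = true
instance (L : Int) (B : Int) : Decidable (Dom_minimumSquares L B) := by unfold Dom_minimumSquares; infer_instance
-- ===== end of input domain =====

-- B replaces A's divisibility-shortcut branch + destructive while loop with one recursive
-- remainder-testing Euclid gcd helper and a single uniform return formula; equal wherever A returns.

-- termination measure for Python-style Euclid steps (shared by both ports)
theorem pymod_natAbs_lt (a b : Int) (hb : b ≠ 0) :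
    (PySem.Int.mod a b).natAbs < b.natAbs := by
  rcases lt_trichotomy b 0 with h | h | h
  · have := PySem.Int.mod_neg_bounds a h
    omega
  · exact absurd h hb
  · have h1 := PySem.Int.mod_nonneg a h
    have h2 := PySem.Int.mod_lt a h
    omega

theorem pymod_zero (a : Int) : PySem.Int.mod a 0 = a := by
  have := PySem.Int.floordiv_mul_add_mod a 0
  omega

-- ===== PORT A =====
-- the 'while b: a,b = b, a%b' loop of A
def euclidA (a b : Int) : Int :=
  if _h : b = 0 then a else euclidA b (PySem.Int.mod a b)
termination_by b.natAbs
decreasing_by exact pymod_natAbs_lt a b _h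

def minimumSquares (L : Int) (B : Int) : List Int :=
  let a := max L B
  let b := min L B
  if PySem.Int.mod a b = 0 then
    [PySem.Int.floordiv a b, b]
  else
    let g := euclidA a b
    [PySem.Int.floordiv L g * PySem.Int.floordiv B g, g]

-- ===== PORT B =====
-- Source B's recursive _gcd: r = x % y; return y if r == 0 else _gcd(y, r)
def gcdB (x y : Int) : Int :=
  if _h : PySem.Int.mod x y = 0 then y else gcdB y (PySem.Int.mod x y)
termination_by y.natAbs + (if y = 0 then x.natAbs + 1 else 0)
decreasing_by
  by_cases hy : y = 0
  · subst hy
    have hx : x ≠ 0 := by rwa [pymod_zero] at _h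
    simp [pymod_zero, hx]
  · have h1 := pymod_natAbs_lt x y hy
    rw [if_neg hy]
    split <;> omega

def minimumSquares_alt (L : Int) (B : Int) : List Int :=
  let g := gcdB (max L B) (min L B)
  [PySem.Int.floordiv L g * PySem.Int.floordiv B g, g]

-- ===== PRECONDITION & SPEC =====
-- Pre_ excludes exactly the inputs with min(L,B) = 0, where both Pythons raise ZeroDivisionError.
def Pre_minimumSquares (L : Int) (B : Int) : Prop := min L B ≠ 0
instance (L : Int) (B : Int) : Decidable (Pre_minimumSquares L B) := by
  unfold Pre_minimumSquares; infer_instance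

def pvWitness_minimumSquares : Int × Int := (6, 4)

def Spec_minimumSquares (L : Int) (B : Int) (out : List Int) : Prop := out = minimumSquares_alt L B
instance (L : Int) (B : Int) (out : List Int) : Decidable (Spec_minimumSquares L B out) := by
  unfold Spec_minimumSquares; infer_instance

-- ===== CLAIM (what is proved, stated in full; the proofs are below) =====
def Claim_equal_minimumSquares : Prop := ∀ (L : Int) (B : Int), Dom_minimumSquares L B → Pre_minimumSquares L B → Spec_minimumSquares L B (minimumSquares L B)

-- ===== LEMMAS AND PROOFS =====

-- the Euclid loop computes the gcd, carrying the sign of its second argument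
theorem euclidA_eq (a b : Int) (hb : b ≠ 0) :
    euclidA a b = if b < 0 then -(Int.gcd a b : Int) else (Int.gcd a b : Int) := by
  rw [euclidA, dif_neg hb]
  by_cases h0 : PySem.Int.mod a b = 0
  · rw [h0, euclidA, dif_pos rfl]
    have hdvd : b ∣ a := (PySem.Int.mod_eq_zero_iff_dvd a b).mp h0
    rw [Int.gcd_comm, Int.gcd_eq_natAbs_left hdvd]
    split <;> omega
  · rw [euclidA_eq b (PySem.Int.mod a b) h0]
    have hq := PySem.Int.floordiv_mul_add_mod a b
    have hmod : PySem.Int.mod a b = a - PySem.Int.floordiv a b * b := by omega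
    have hg : Int.gcd b (PySem.Int.mod a b) = Int.gcd a b := by
      rw [hmod, Int.gcd_sub_mul_right_right, Int.gcd_comm]
    have hsgn : PySem.Int.mod a b < 0 ↔ b < 0 := by
      rcases lt_trichotomy b 0 with h | h | h
      · have := PySem.Int.mod_neg_bounds a h
        omega
      · exact absurd h hb
      · have h1 := PySem.Int.mod_nonneg a h
        omega
    simp only [hg, hsgn]
termination_by b.natAbs
decreasing_by exact pymod_natAbs_lt a b hb

-- B's remainder-testing recursion agrees with A's loop whenever the divisor is nonzero
theorem gcdB_eq_euclidA (x y : Int) (hy : y ≠ 0) : gcdB x y = euclidA x y := by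
  rw [gcdB, euclidA, dif_neg hy]
  by_cases h0 : PySem.Int.mod x y = 0
  · rw [dif_pos h0, h0, euclidA, dif_pos rfl]
  · rw [dif_neg h0]
    exact gcdB_eq_euclidA y (PySem.Int.mod x y) h0
termination_by y.natAbs
decreasing_by exact pymod_natAbs_lt x y hy

-- the common closed form both programs compute: gcd L B carrying the sign of min L B
def sgnGcd (L B : Int) : Int :=
  if min L B < 0 then -(Int.gcd L B : Int) else (Int.gcd L B : Int)

theorem gcd_max_min (L B : Int) : (Int.gcd (max L B) (min L B) : Int) = (Int.gcd L B : Int) := by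
  rcases le_total L B with h | h
  · simp [max_eq_right h, min_eq_left h, Int.gcd_comm]
  · simp [max_eq_left h, min_eq_right h]

theorem alt_closed (L B : Int) (hb : min L B ≠ 0) : minimumSquares_alt L B =
    [PySem.Int.floordiv L (sgnGcd L B) * PySem.Int.floordiv B (sgnGcd L B), sgnGcd L B] := by
  have hg : gcdB (max L B) (min L B) = sgnGcd L B := by
    rw [gcdB_eq_euclidA _ _ hb, euclidA_eq _ _ hb, sgnGcd, gcd_max_min]
  simp only [minimumSquares_alt, hg]

theorem floordiv_self (b : Int) (hb : b ≠ 0) : PySem.Int.floordiv b b = 1 := by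
  have h0 : PySem.Int.mod b b = 0 := (PySem.Int.mod_eq_zero_iff_dvd b b).mpr dvd_rfl
  have hq := PySem.Int.floordiv_mul_add_mod b b
  have : PySem.Int.floordiv b b * b = 1 * b := by omega
  exact mul_right_cancel₀ hb this

theorem a_closed (L B : Int) (hb : min L B ≠ 0) : minimumSquares L B =
    [PySem.Int.floordiv L (sgnGcd L B) * PySem.Int.floordiv B (sgnGcd L B), sgnGcd L B] := by
  simp only [minimumSquares]
  by_cases h0 : PySem.Int.mod (max L B) (min L B) = 0
  · rw [if_pos h0]
    have hdvd : min L B ∣ max L B := (PySem.Int.mod_eq_zero_iff_dvd _ _).mp h0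
    have hgb : (Int.gcd L B : Int) = ((min L B).natAbs : Int) := by
      rw [← gcd_max_min, Int.gcd_comm, Int.gcd_eq_natAbs_left hdvd]
    have hG : sgnGcd L B = min L B := by
      rw [sgnGcd, hgb]
      split <;> omega
    rw [hG]
    have h1 : PySem.Int.floordiv (min L B) (min L B) = 1 := floordiv_self _ hb
    rcases le_total L B with h | h
    · rw [max_eq_right h, min_eq_left h] at *
      rw [h1, one_mul]
    · rw [max_eq_left h, min_eq_right h] at *
      rw [h1, mul_one]
  · rw [if_neg h0]
    have hg : euclidA (max L B) (min L B) = sgnGcd L B := by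
      rw [euclidA_eq _ _ hb, sgnGcd, gcd_max_min]
    simp only [hg]

-- ===== VERDICT (by name: the statement is the Claim_ definition above) =====
theorem minimumSquares_spec : Claim_equal_minimumSquares := by
  intro L B _ hpre
  unfold Spec_minimumSquares
  rw [a_closed L B hpre, alt_closed L B hpre]
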